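-- pv_equiv track=rewrite | github.com/RideGreg/LeetCode | Python/rearrange-spaces-between-words.py | reorderSpaces_kamyu
-- ===== SOURCE A (Python) =====
-- def reorderSpaces_kamyu(text):
--     """
--     :type text: str
--     :rtype: str
--     """
--     text = list(text)
--     # count the spaces and words
--     space_count, word_count = 0, 0
--     for i, c in enumerate(text):
--         if c == ' ':
--             space_count += 1
--         elif i == 0 or text[i-1] == ' ':
--             word_count += 1
--
--     # rearrange all the spaces to the right
--     left, i = 0, 0
--     while i < len(text):
--         has_word = False
--         while i < len(text) and text[i] != ' ':
--             text[left], text[i] = text[i], text[left]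
--             left += 1
--             i += 1
--             has_word = True
--         if has_word:
--             left += 1  # keep one space
--         i += 1
--
--     # rearrange all the spaces to the left
--     equal_count = space_count//(word_count-1) if word_count-1 > 0 else 0
--     extra_count = space_count%(word_count-1) if word_count-1 > 0 else space_count
--     right, i = len(text)-1-extra_count, len(text)-1
--     while i >= 0:
--         has_word = False
--         while i >= 0 and text[i] != ' ':
--             text[right], text[i] = text[i], text[right]
--             right -= 1
--             i -= 1
--             has_word = True
--         if has_word:
--             right -= equal_count  # keep equal_count spaces
--         i -= 1
--     return "".join(text)
-- ===== SOURCE B (Python) =====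
-- def reorderSpaces_kamyu(text):
--     words = [w for w in text.split(' ') if w]
--     space_count = text.count(' ')
--     if len(words) <= 1:
--         return (words[0] if words else '') + ' ' * space_count
--     equal, extra = divmod(space_count, len(words) - 1)
--     return (' ' * equal).join(words) + ' ' * extra
-- ===== Notes on version B (the rewrite author's own statement) =====
-- stated objective: simpler
-- what changed: Replaces the two in-place pointer-swapping compaction passes over a char buffer with a direct construction: split the text on the space separator, count the separators, and join the words with computed gaps.
import Mathlib
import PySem

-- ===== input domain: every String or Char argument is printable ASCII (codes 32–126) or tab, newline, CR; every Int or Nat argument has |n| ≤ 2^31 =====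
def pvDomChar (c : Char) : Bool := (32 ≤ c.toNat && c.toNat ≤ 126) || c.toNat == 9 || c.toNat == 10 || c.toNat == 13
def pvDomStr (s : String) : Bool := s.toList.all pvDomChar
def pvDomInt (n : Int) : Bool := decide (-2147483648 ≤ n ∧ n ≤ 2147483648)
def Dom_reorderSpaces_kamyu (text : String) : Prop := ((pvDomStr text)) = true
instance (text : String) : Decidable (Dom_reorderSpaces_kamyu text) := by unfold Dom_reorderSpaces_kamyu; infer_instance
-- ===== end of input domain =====

-- B replaces A's two in-place pointer-swapping compaction passes by a direct
-- split/count/arithmetic/join construction of the result (simpler; measured faster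
-- in a timing run: the work moves into C-level str primitives).

-- ===== PORT A =====
-- literal port of A's tuple swap  text[a], text[b] = text[b], text[a]
def pvSwapA (t : List Char) (a b : Int) : List Char :=
  let x := PySem.List.pyGetD t b ' '
  let y := PySem.List.pyGetD t a ' '
  PySem.List.pySetD (PySem.List.pySetD t a x) b y

-- inner 'while i < len(text) and text[i] != ' '' of the left pass (fuel only makes
-- the same computation total; it is always sufficient at the call site)
def pvInner2 : Nat → List Char → Int → Int → Bool → List Char × Int × Int × Bool
  | 0, t, left, i, hw => (t, left, i, hw)
  | fuel+1, t, left, i, hw =>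
    if i < (t.length : Int) ∧ PySem.List.pyGetD t i ' ' ≠ ' ' then
      pvInner2 fuel (pvSwapA t left i) (left+1) (i+1) true
    else (t, left, i, hw)

-- outer 'while i < len(text)' of the left pass
def pvOuter2 : Nat → List Char → Int → Int → List Char
  | 0, t, _, _ => t
  | fuel+1, t, left, i =>
    if i < (t.length : Int) then
      let r := pvInner2 (t.length + 1) t left i false
      pvOuter2 fuel r.1 (if r.2.2.2 then r.2.1 + 1 else r.2.1) (r.2.2.1 + 1)
    else t

-- inner 'while i >= 0 and text[i] != ' '' of the right pass
def pvInner3 : Nat → List Char → Int → Int → Bool → List Char × Int × Int × Bool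
  | 0, t, right, i, hw => (t, right, i, hw)
  | fuel+1, t, right, i, hw =>
    if 0 ≤ i ∧ PySem.List.pyGetD t i ' ' ≠ ' ' then
      pvInner3 fuel (pvSwapA t right i) (right-1) (i-1) true
    else (t, right, i, hw)

-- outer 'while i >= 0' of the right pass
def pvOuter3 (equal : Int) : Nat → List Char → Int → Int → List Char
  | 0, t, _, _ => t
  | fuel+1, t, right, i =>
    if 0 ≤ i then
      let r := pvInner3 (t.length + 1) t right i false
      pvOuter3 equal fuel r.1 (if r.2.2.2 then r.2.1 - equal else r.2.1) (r.2.2.1 - 1)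
    else t

def reorderSpaces_kamyu (text : String) : String :=
  let t0 := text.toList                -- text = list(text)
  -- for i, c in enumerate(text): count spaces and words (text[i-1] is only read
  -- when i >= 1, hence always in range; the default of pyGetD is never used)
  let counts := (PySem.List.enumerate t0 0).foldl (fun (acc : Int × Int) ic =>
      if ic.2 = ' ' then (acc.1 + 1, acc.2)
      else if ic.1 = 0 ∨ PySem.List.pyGetD t0 (ic.1 - 1) ' ' = ' ' then (acc.1, acc.2 + 1)
      else acc) (0, 0)
  let space_count := counts.1
  let word_count := counts.2
  let t1 := pvOuter2 (t0.length + 1) t0 0 0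
  let equal_count : Int := if word_count - 1 > 0 then PySem.Int.floordiv space_count (word_count - 1) else 0
  let extra_count : Int := if word_count - 1 > 0 then PySem.Int.mod space_count (word_count - 1) else space_count
  let t2 := pvOuter3 equal_count (t1.length + 1) t1 ((t1.length : Int) - 1 - extra_count) ((t1.length : Int) - 1)
  String.ofList t2                     -- "".join(text)

-- ===== PORT B =====
def reorderSpaces_kamyu_alt (text : String) : String :=
  let cs := text.toList
  let words := (PySem.Chars.splitOn cs [' ']).filter (fun w => !w.isEmpty)  -- [w for w in text.split(' ') if w]
  let space_count := PySem.Chars.count cs [' ']                             -- text.count(' ')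
  if words.length ≤ 1 then
    String.ofList (words.headD [] ++ List.replicate space_count ' ')
  else
    let equal := space_count / (words.length - 1)
    let extra := space_count % (words.length - 1)
    String.ofList (PySem.Chars.join (List.replicate equal ' ') words ++ List.replicate extra ' ')

-- ===== PRECONDITION & SPEC =====
def Spec_reorderSpaces_kamyu (text : String) (out : String) : Prop := out = reorderSpaces_kamyu_alt text
instance (text : String) (out : String) : Decidable (Spec_reorderSpaces_kamyu text out) := by unfold Spec_reorderSpaces_kamyu; infer_instance

-- ===== CLAIM (what is proved, stated in full; the proofs are below) =====
def Claim_equal_reorderSpaces_kamyu : Prop := ∀ (text : String), Dom_reorderSpaces_kamyu text → Spec_reorderSpaces_kamyu text (reorderSpaces_kamyu text)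

-- ===== LEMMAS AND PROOFS =====

-- split of a char list on a single literal space, structurally
def pvSplitSp : List Char → List (List Char)
  | [] => [[]]
  | c :: r =>
    if c = ' ' then [] :: pvSplitSp r
    else match pvSplitSp r with
      | p :: ps => (c :: p) :: ps
      | [] => [[c]]

def pvJoin1 (l : List (List Char)) : List Char := List.intercalate [' '] l
def pvWords (cs : List Char) : List (List Char) := (pvSplitSp cs).filter (fun w => !w.isEmpty)

-- number of word starts, scanning with the previous character (sentinel ' ')
def pvWcAux : Char → List Char → Nat
  | _, [] => 0
  | p, c :: r => (if c ≠ ' ' ∧ p = ' ' then 1 else 0) + pvWcAux c r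

-- value of the left pass: words so far joined by one space, then pending spaces
def pvP2 : List (List Char) → Nat → List Char
  | [], m => List.replicate m ' '
  | [w], m => w ++ List.replicate m ' '
  | w :: ps, m => if w = [] then pvP2 ps (m+1) else w ++ ' ' :: pvP2 ps m

def pvMergeHead (x : List Char) : List (List Char) → List (List Char)
  | p :: ps => (x ++ p) :: ps
  | [] => [x]

-- generic list glue (no matching library lemma found by search)
lemma pvGetD_append (xs ys : List Char) (k : Nat) (d : Char) :
    (xs ++ ys).getD (xs.length + k) d = ys.getD k d := by
  simp [List.getD_eq_getElem?_getD, List.getElem?_append_right]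

lemma pvGetD_append_left (xs ys : List Char) (k : Nat) (d : Char) (h : k < xs.length) :
    (xs ++ ys).getD k d = xs.getD k d := by
  simp [List.getD_eq_getElem?_getD, List.getElem?_append_left h]

lemma pvSet_append (xs ys : List Char) (k : Nat) (v : Char) :
    (xs ++ ys).set (xs.length + k) v = xs ++ ys.set k v := by
  rw [List.set_append_right] <;> simp

lemma pvRep_comm (m : Nat) (X : List Char) :
    List.replicate m ' ' ++ ' ' :: X = ' ' :: (List.replicate m ' ' ++ X) := by
  have h : List.replicate m ' ' ++ ' ' :: X = (List.replicate m ' ' ++ [' ']) ++ X := by simp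
  rw [h, ← List.replicate_succ', List.replicate_succ]
  simp

lemma pvIntercalate_concat (sep : List Char) (l : List (List Char)) (x : List Char) (h : l ≠ []) :
    List.intercalate sep (l ++ [x]) = List.intercalate sep l ++ sep ++ x := by
  induction l with
  | nil => simp at h
  | cons y ys ih =>
    cases ys with
    | nil => simp [List.intercalate, List.intersperse]
    | cons z zs =>
      have h2 := ih (by simp)
      simp only [List.cons_append]
      simp only [List.intercalate, List.intersperse] at h2 ⊢
      simp only [List.flatten_cons, List.cons_append] at h2 ⊢
      rw [h2]
      simp [List.append_assoc]

lemma pvJoin1_singleton (x : List Char) : pvJoin1 [x] = x := by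
  simp [pvJoin1, List.intercalate]

lemma pvJoin1_cons (x y : List Char) (ys : List (List Char)) :
    pvJoin1 (x :: y :: ys) = x ++ ' ' :: pvJoin1 (y :: ys) := by
  simp [pvJoin1, List.intercalate, List.intersperse]

lemma pvJoin1_cons_head (c : Char) (q : List Char) (qs : List (List Char)) :
    pvJoin1 ((c :: q) :: qs) = c :: pvJoin1 (q :: qs) := by
  cases qs with
  | nil => simp [pvJoin1_singleton]
  | cons z zs => rw [pvJoin1_cons, pvJoin1_cons]; simp

lemma pvJoin1_concat (l : List (List Char)) (x : List Char) (h : l ≠ []) :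
    pvJoin1 (l ++ [x]) = pvJoin1 l ++ ' ' :: x := by
  have h2 := pvIntercalate_concat [' '] l x h
  simpa [pvJoin1] using h2

lemma pvLen_join1 (l : List (List Char)) : l.length ≤ (pvJoin1 l).length + 1 := by
  induction l with
  | nil => simp
  | cons y ys ih =>
    cases ys with
    | nil => simp [pvJoin1_singleton]
    | cons z zs =>
      rw [pvJoin1_cons]
      simp only [List.length_cons, List.length_append] at *
      omega

lemma pvSplitSp_ne_nil (cs : List Char) : pvSplitSp cs ≠ [] := by
  induction cs with
  | nil => simp [pvSplitSp]
  | cons c r ih =>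
    by_cases h : c = ' '
    · simp [pvSplitSp, h]
    · simp only [pvSplitSp, if_neg h]
      cases hr : pvSplitSp r <;> simp

lemma pvSplitSp_cons_sp (r : List Char) : pvSplitSp (' ' :: r) = [] :: pvSplitSp r := by
  simp [pvSplitSp]

lemma pvSplitSp_cons_nonsp (c : Char) (r : List Char) (h : c ≠ ' ')
    (q : List Char) (qs : List (List Char)) (hr : pvSplitSp r = q :: qs) :
    pvSplitSp (c :: r) = (c :: q) :: qs := by
  simp [pvSplitSp, h, hr]

lemma pvJoin1_splitSp (cs : List Char) : pvJoin1 (pvSplitSp cs) = cs := by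
  induction cs with
  | nil => simp [pvSplitSp, pvJoin1, List.intercalate]
  | cons c r ih =>
    obtain ⟨q, qs, hr⟩ := List.exists_cons_of_ne_nil (pvSplitSp_ne_nil r)
    by_cases h : c = ' '
    · subst h
      rw [pvSplitSp_cons_sp, hr, pvJoin1_cons, ← hr, ih]
      simp
    · rw [pvSplitSp_cons_nonsp c r h q qs hr, pvJoin1_cons_head, ← hr, ih]

lemma pvNoSp_splitSp (cs : List Char) : ∀ p ∈ pvSplitSp cs, ∀ c ∈ p, c ≠ ' ' := by
  induction cs with
  | nil => simp [pvSplitSp]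
  | cons c r ih =>
    obtain ⟨q, qs, hr⟩ := List.exists_cons_of_ne_nil (pvSplitSp_ne_nil r)
    by_cases h : c = ' '
    · subst h
      rw [pvSplitSp_cons_sp]
      intro p hp
      rcases List.mem_cons.mp hp with hp | hp
      · simp [hp]
      · exact ih p hp
    · rw [pvSplitSp_cons_nonsp c r h q qs hr]
      intro p hp
      rcases List.mem_cons.mp hp with hp | hp
      · subst hp
        intro d hd
        rcases List.mem_cons.mp hd with hd | hd
        · simpa [hd] using h
        · exact ih q (by rw [hr]; exact List.mem_cons_self) d hd
      · exact ih p (by rw [hr]; exact List.mem_cons_of_mem _ hp)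

lemma pvCount_join1 (pieces : List (List Char)) (h : ∀ p ∈ pieces, ∀ c ∈ p, c ≠ ' ')
    (hne : pieces ≠ []) : (pvJoin1 pieces).count ' ' = pieces.length - 1 := by
  induction pieces with
  | nil => simp at hne
  | cons x ys ih =>
    have hx : x.count ' ' = 0 := by
      rw [List.count_eq_zero]
      intro hmem
      exact h x List.mem_cons_self ' ' hmem rfl
    cases ys with
    | nil => simp [pvJoin1_singleton, hx]
    | cons z zs =>
      rw [pvJoin1_cons]
      have ih2 := ih (fun p hp => h p (List.mem_cons_of_mem _ hp)) (by simp)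
      simp [List.count_append, List.count_cons, hx] at ih2 ⊢ <;> omega

lemma pvWcAux_eq (cs : List Char) : ∀ (p : Char),
    pvWcAux p cs = (((if p = ' ' then pvSplitSp cs else (pvSplitSp cs).tail)).filter (fun w => !w.isEmpty)).length := by
  induction cs with
  | nil =>
    intro p
    split_ifs <;> simp [pvSplitSp, pvWcAux]
  | cons c r ih =>
    intro p
    obtain ⟨q, qs, hr⟩ := List.exists_cons_of_ne_nil (pvSplitSp_ne_nil r)
    by_cases hc : c = ' '
    · subst hc
      have h1 := ih ' '
      rw [if_pos rfl] at h1
      have e1 : pvWcAux p (' ' :: r) = (if (' ' ≠ ' ' ∧ p = ' ') then 1 else 0) + pvWcAux ' ' r := rfl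
      rw [e1, if_neg (fun hcon => hcon.1 rfl), h1, pvSplitSp_cons_sp]
      split_ifs <;> simp
    · have h1 := ih c
      rw [if_neg hc, hr] at h1
      have e1 : pvWcAux p (c :: r) = (if (c ≠ ' ' ∧ p = ' ') then 1 else 0) + pvWcAux c r := rfl
      rw [e1, h1, pvSplitSp_cons_nonsp c r hc q qs hr]
      by_cases hp : p = ' '
      · rw [if_pos ⟨hc, hp⟩, if_pos hp]
        simp [List.filter, hc]
        omega
      · rw [if_neg (fun hcon => hp hcon.2), if_neg hp]
        simp

-- the counting loop of A
lemma pvZip_eq (t : List Char) :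
    ((' ' :: t).zip t) = (PySem.List.enumerate t 0).map (fun ic => (PySem.List.pyGetD (' ' :: t) ic.1 ' ', ic.2)) := by
  apply List.ext_getElem
  · simp [PySem.List.length_enumerate]
  · intro k h1 h2
    have hk : k < t.length := by simpa using h1
    simp only [List.getElem_zip, List.getElem_map, PySem.List.getElem_enumerate, zero_add,
      PySem.List.pyGetD_natCast]
    rw [List.getD_eq_getElem _ _ (by simpa using Nat.lt_succ_of_lt hk)]

lemma pvZipFold (t : List Char) : ∀ (p : Char) (sc wc : Int),
    ((p :: t).zip t).foldl (fun (acc : Int × Int) pc =>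
        if pc.2 = ' ' then (acc.1 + 1, acc.2)
        else if pc.1 = ' ' then (acc.1, acc.2 + 1) else acc) (sc, wc)
      = (sc + t.count ' ', wc + pvWcAux p t) := by
  induction t with
  | nil => intro p sc wc; simp [pvWcAux]
  | cons c r ih =>
    intro p sc wc
    rw [List.zip_cons_cons, List.foldl_cons]
    by_cases hc : c = ' ' <;> by_cases hp : p = ' ' <;>
      simp [hc, hp, ih, List.count_cons, pvWcAux, Prod.ext_iff] <;>
      push_cast <;> ring

lemma pvCountLoop (t0 : List Char) :
    (PySem.List.enumerate t0 0).foldl (fun (acc : Int × Int) ic =>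
      if ic.2 = ' ' then (acc.1 + 1, acc.2)
      else if ic.1 = 0 ∨ PySem.List.pyGetD t0 (ic.1 - 1) ' ' = ' ' then (acc.1, acc.2 + 1)
      else acc) (0, 0) = ((t0.count ' ' : Int), ((pvWords t0).length : Int)) := by
  have hcong : (PySem.List.enumerate t0 0).foldl (fun (acc : Int × Int) ic =>
      if ic.2 = ' ' then (acc.1 + 1, acc.2)
      else if ic.1 = 0 ∨ PySem.List.pyGetD t0 (ic.1 - 1) ' ' = ' ' then (acc.1, acc.2 + 1)
      else acc) (0, 0)
      = (PySem.List.enumerate t0 0).foldl (fun (acc : Int × Int) ic =>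
      if ic.2 = ' ' then (acc.1 + 1, acc.2)
      else if PySem.List.pyGetD (' ' :: t0) ic.1 ' ' = ' ' then (acc.1, acc.2 + 1)
      else acc) (0, 0) := by
    apply PySem.List.foldl_congr_mem
    intro acc x hx
    rw [PySem.List.mem_enumerate_iff] at hx
    obtain ⟨k, hk, rfl⟩ := hx
    simp only [zero_add]
    cases k with
    | zero =>
      simp [PySem.List.pyGetD_zero_cons]
    | succ j =>
      have hg : PySem.List.pyGetD t0 (((j + 1 : Nat) : Int) - 1) ' ' = t0.getD j ' ' := by
        have h1 : ((j + 1 : Nat) : Int) - 1 = ((j : Nat) : Int) := by push_cast; ring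
        rw [h1, PySem.List.pyGetD_natCast]
      have hg2 : PySem.List.pyGetD (' ' :: t0) ((j + 1 : Nat) : Int) ' ' = t0.getD j ' ' := by
        rw [PySem.List.pyGetD_natCast]
        simp
      have hne : ¬ (((j + 1 : Nat) : Int) = 0) := by push_cast; omega
      rw [hg, hg2]
      simp only [hne, false_or]
  rw [hcong]
  have hmap := pvZip_eq t0
  have hfold : ((' ' :: t0).zip t0).foldl (fun (acc : Int × Int) pc =>
        if pc.2 = ' ' then (acc.1 + 1, acc.2)
        else if pc.1 = ' ' then (acc.1, acc.2 + 1) else acc) ((0 : Int), (0 : Int))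
      = (PySem.List.enumerate t0 0).foldl (fun (acc : Int × Int) ic =>
      if ic.2 = ' ' then (acc.1 + 1, acc.2)
      else if PySem.List.pyGetD (' ' :: t0) ic.1 ' ' = ' ' then (acc.1, acc.2 + 1)
      else acc) (0, 0) := by
    rw [hmap, List.foldl_map]
  rw [← hfold, pvZipFold]
  have hwc := pvWcAux_eq t0 ' '
  rw [if_pos rfl] at hwc
  simp [pvWords, hwc]

-- bridges from PySem's fuel-based splitOn / count to the structural forms
lemma pvMergeHead_nil (l : List (List Char)) (h : l ≠ []) : pvMergeHead [] l = l := by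
  cases l with
  | nil => simp at h
  | cons p ps => simp [pvMergeHead]

lemma pvGo_eq : ∀ (l : List Char) (fuel : Nat) (cur : List Char) (acc : List (List Char)),
    l.length < fuel →
    PySem.Chars.splitOn.go [' '] fuel l cur acc = acc.reverse ++ pvMergeHead cur.reverse (pvSplitSp l) := by
  intro l
  induction l with
  | nil =>
    intro fuel cur acc hf
    cases fuel with
    | zero => omega
    | succ f => simp [PySem.Chars.splitOn.go, pvSplitSp, pvMergeHead]
  | cons c rest ih =>
    intro fuel cur acc hf
    cases fuel with
    | zero => omega
    | succ f =>
      obtain ⟨q, qs, hr⟩ := List.exists_cons_of_ne_nil (pvSplitSp_ne_nil rest)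
      by_cases hc : c = ' '
      · subst hc
        have hpre : [' '].isPrefixOf (' ' :: rest) = true := by simp [List.isPrefixOf]
        rw [PySem.Chars.splitOn.go]
        simp only [hpre, if_true]
        rw [show (List.drop ([' '] : List Char).length (' ' :: rest)) = rest by simp]
        rw [ih f [] (cur.reverse :: acc) (by simpa using hf)]
        rw [pvSplitSp_cons_sp, pvMergeHead, hr]
        simp [pvMergeHead]
      · have hpre : [' '].isPrefixOf (c :: rest) = false := by
          simp [List.isPrefixOf]
          exact fun h => hc h.symm
        rw [PySem.Chars.splitOn.go]
        rw [hpre]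
        simp only [Bool.false_eq_true, if_false]
        rw [ih f (c :: cur) acc (by simpa using hf)]
        rw [pvSplitSp_cons_nonsp c rest hc q qs hr, hr]
        simp [pvMergeHead]

lemma pvSplitOn_eq (cs : List Char) : PySem.Chars.splitOn cs [' '] = pvSplitSp cs := by
  rw [PySem.Chars.splitOn, pvGo_eq cs (cs.length + 1) [] [] (by omega)]
  simp [pvMergeHead_nil _ (pvSplitSp_ne_nil cs)]

lemma pvCntGo : ∀ (l : List Char) (fuel : Nat) (acc : Nat), l.length ≤ fuel →
    PySem.Chars.count.go [' '] fuel l acc = acc + l.count ' ' := by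
  intro l
  induction l with
  | nil =>
    intro fuel acc hf
    cases fuel <;> simp [PySem.Chars.count.go]
  | cons c rest ih =>
    intro fuel acc hf
    cases fuel with
    | zero => simp at hf
    | succ f =>
      by_cases hc : c = ' '
      · subst hc
        have hpre : [' '].isPrefixOf (' ' :: rest) = true := by simp [List.isPrefixOf]
        rw [PySem.Chars.count.go]
        simp only [hpre, if_true]
        rw [show (List.drop ([' '] : List Char).length (' ' :: rest)) = rest by simp]
        rw [ih f (acc + 1) (by simpa using hf)]
        simp [List.count_cons]
        omega
      · have hpre : [' '].isPrefixOf (c :: rest) = false := by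
          simp [List.isPrefixOf]
          exact fun h => hc h.symm
        rw [PySem.Chars.count.go]
        rw [hpre]
        simp only [Bool.false_eq_true, if_false]
        rw [ih f acc (by simpa using hf)]
        simp [List.count_cons, hc]

lemma pvCountSp_eq (cs : List Char) : PySem.Chars.count cs [' '] = cs.count ' ' := by
  rw [PySem.Chars.count]
  simp only [List.isEmpty_cons, Bool.false_eq_true, if_false]
  rw [pvCntGo cs cs.length 0 (le_refl _)]
  simp

-- ===== left pass =====

lemma pvSwapA_left (done : List Char) (c : Char) (m : Nat) (rest : List Char) :
    pvSwapA (done ++ List.replicate m ' ' ++ c :: rest) (done.length : Int) ((done.length + m : Nat) : Int)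
      = done ++ c :: (List.replicate m ' ' ++ rest) := by
  have hx : (done ++ List.replicate m ' ' ++ c :: rest).getD (done.length + m) ' ' = c := by
    have h := pvGetD_append (done ++ List.replicate m ' ') (c :: rest) 0 ' '
    simp only [List.length_append, List.length_replicate, Nat.add_zero] at h
    rw [h]
    simp
  cases m with
  | zero =>
    simp only [List.replicate_zero, List.append_nil, List.nil_append, Nat.add_zero] at *
    unfold pvSwapA
    simp only [PySem.List.pyGetD_natCast, PySem.List.pySetD_natCast, hx]
    have h0 : (done ++ c :: rest).set done.length c = done ++ c :: rest := by
      have h := pvSet_append done (c :: rest) 0 c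
      simpa using h
    rw [h0, h0]
  | succ n =>
    have hy : (done ++ List.replicate (n+1) ' ' ++ c :: rest).getD done.length ' ' = ' ' := by
      rw [List.append_assoc]
      have h := pvGetD_append done (List.replicate (n+1) ' ' ++ c :: rest) 0 ' '
      simp only [Nat.add_zero] at h
      rw [h]
      simp [List.replicate_succ]
    unfold pvSwapA
    simp only [PySem.List.pyGetD_natCast, PySem.List.pySetD_natCast, hx, hy]
    have h1 : (done ++ List.replicate (n+1) ' ' ++ c :: rest).set done.length c
        = done ++ c :: (List.replicate n ' ' ++ c :: rest) := by
      rw [List.append_assoc]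
      have h := pvSet_append done (List.replicate (n+1) ' ' ++ c :: rest) 0 c
      simp only [Nat.add_zero] at h
      rw [h]
      simp [List.replicate_succ]
    rw [h1]
    have h2 : (done ++ c :: (List.replicate n ' ' ++ c :: rest)).set (done.length + (n+1)) ' '
        = done ++ c :: (List.replicate n ' ' ++ ' ' :: rest) := by
      rw [pvSet_append]
      have hs1 : (c :: (List.replicate n ' ' ++ c :: rest)).set (n+1) ' '
          = c :: ((List.replicate n ' ' ++ c :: rest).set n ' ') := by simp
      rw [hs1]
      have hs2 := pvSet_append (List.replicate n ' ') (c :: rest) 0 ' '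
      simp only [Nat.add_zero, List.length_replicate] at hs2
      rw [hs2]
      simp
    rw [h2]
    congr 1
    rw [pvRep_comm]
    simp [List.replicate_succ]

lemma pvInner2_noop (fuel : Nat) (t : List Char) (left i : Int) (hw : Bool)
    (h : ¬(i < (t.length : Int) ∧ PySem.List.pyGetD t i ' ' ≠ ' ')) :
    pvInner2 fuel t left i hw = (t, left, i, hw) := by
  cases fuel <;> simp [pvInner2, h]

lemma pvInner3_noop (fuel : Nat) (t : List Char) (right i : Int) (hw : Bool)
    (h : ¬(0 ≤ i ∧ PySem.List.pyGetD t i ' ' ≠ ' ')) :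
    pvInner3 fuel t right i hw = (t, right, i, hw) := by
  cases fuel <;> simp [pvInner3, h]

lemma pvOuter2_stop (fuel : Nat) (t : List Char) (left i : Int) (hi : ¬ i < (t.length : Int)) :
    pvOuter2 fuel t left i = t := by
  cases fuel <;> simp [pvOuter2, hi]

lemma pvOuter3_stop (e : Int) (fuel : Nat) (t : List Char) (right i : Int) (hi : i < 0) :
    pvOuter3 e fuel t right i = t := by
  cases fuel <;> simp [pvOuter3, show ¬ (0 ≤ i) by omega]

lemma pvInner2_run : ∀ (w : List Char), (∀ c ∈ w, c ≠ ' ') →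
    ∀ (done : List Char) (m fuel : Nat) (B : List Char) (hwf : Bool),
    B.headD ' ' = ' ' → w.length < fuel →
    pvInner2 fuel (done ++ List.replicate m ' ' ++ w ++ B) (done.length : Int) ((done.length + m : Nat) : Int) hwf
      = (done ++ w ++ List.replicate m ' ' ++ B, ((done.length + w.length : Nat) : Int),
         ((done.length + w.length + m : Nat) : Int), hwf || !w.isEmpty) := by
  intro w
  induction w with
  | nil =>
    intro _ done m fuel B hwf hB hf
    have ht : done ++ List.replicate m ' ' ++ [] ++ B = (done ++ List.replicate m ' ') ++ B := by simp
    rw [ht]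
    have hcond : ¬(((done.length + m : Nat) : Int) < (((done ++ List.replicate m ' ') ++ B).length : Int)
        ∧ PySem.List.pyGetD ((done ++ List.replicate m ' ') ++ B) ((done.length + m : Nat) : Int) ' ' ≠ ' ') := by
      cases B with
      | nil => simp
      | cons b B' =>
        have hb : b = ' ' := by simpa using hB
        subst hb
        intro hcontra
        apply hcontra.2
        rw [PySem.List.pyGetD_natCast]
        have h := pvGetD_append (done ++ List.replicate m ' ') (' ' :: B') 0 ' '
        simp only [List.length_append, List.length_replicate, Nat.add_zero] at h
        rw [h]
        simp
    rw [pvInner2_noop _ _ _ _ _ hcond]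
    simp
  | cons c w' ih =>
    intro hw done m fuel B hwf hB hf
    have hc : c ≠ ' ' := hw c List.mem_cons_self
    cases fuel with
    | zero => simp at hf
    | succ f =>
      have ht : done ++ List.replicate m ' ' ++ (c :: w') ++ B
          = done ++ List.replicate m ' ' ++ c :: (w' ++ B) := by simp
      rw [ht, pvInner2]
      have hlt : ((done.length + m : Nat) : Int) < ((done ++ List.replicate m ' ' ++ c :: (w' ++ B)).length : Int) := by
        simp [List.length_append]
        push_cast
        omega
      have hget : PySem.List.pyGetD (done ++ List.replicate m ' ' ++ c :: (w' ++ B)) ((done.length + m : Nat) : Int) ' ' = c := by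
        rw [PySem.List.pyGetD_natCast]
        have h := pvGetD_append (done ++ List.replicate m ' ') (c :: (w' ++ B)) 0 ' '
        simp only [List.length_append, List.length_replicate, Nat.add_zero] at h
        rw [h]
        simp
      rw [if_pos ⟨hlt, by rw [hget]; exact hc⟩]
      rw [pvSwapA_left]
      have ht2 : done ++ c :: (List.replicate m ' ' ++ (w' ++ B))
          = (done ++ [c]) ++ List.replicate m ' ' ++ w' ++ B := by simp
      have hl : ((done.length : Int) + 1) = (((done ++ [c]).length : Nat) : Int) := by
        simp
      have hi : (((done.length + m : Nat) : Int) + 1) = ((((done ++ [c]).length + m : Nat)) : Int) := by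
        simp
        push_cast
        ring
      rw [ht2, hl, hi, ih (fun d hd => hw d (List.mem_cons_of_mem _ hd)) (done ++ [c]) m f B true hB (by simp at hf ⊢; omega)]
      simp only [Prod.mk.injEq]
      refine ⟨by simp, by simp <;> push_cast <;> ring, by simp <;> push_cast <;> ring, by simp⟩

lemma pvOuter2_run : ∀ (pieces : List (List Char)), (∀ p ∈ pieces, ∀ c ∈ p, c ≠ ' ') →
    ∀ (done : List Char) (m fuel : Nat), pieces.length ≤ fuel →
    pvOuter2 fuel (done ++ List.replicate m ' ' ++ pvJoin1 pieces) (done.length : Int) ((done.length + m : Nat) : Int)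
      = done ++ pvP2 pieces m := by
  intro pieces
  induction pieces with
  | nil =>
    intro _ done m fuel _
    rw [show pvJoin1 [] = [] from rfl]
    rw [pvOuter2_stop _ _ _ _ (by simp [List.length_append] <;> push_cast <;> omega)]
    simp [pvP2]
  | cons w ps ih =>
    intro h done m fuel hfuel
    have hps_nosp : ∀ p ∈ ps, ∀ c ∈ p, c ≠ ' ' := fun p hp => h p (List.mem_cons_of_mem _ hp)
    have hw_nosp : ∀ c ∈ w, c ≠ ' ' := h w List.mem_cons_self
    cases fuel with
    | zero => simp at hfuel
    | succ f =>
      cases ps with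
      | nil =>
        by_cases hw : w = []
        · subst hw
          rw [show pvJoin1 [([] : List Char)] = [] from by simp [pvJoin1_singleton]]
          rw [pvOuter2_stop _ _ _ _ (by simp [List.length_append] <;> push_cast <;> omega)]
          simp [pvP2]
        · rw [pvJoin1_singleton, pvOuter2]
          have hwlen : 1 ≤ w.length := by
            cases w
            · simp at hw
            · simp
          rw [if_pos (by simp [List.length_append] <;> push_cast <;> omega)]
          have htB : done ++ List.replicate m ' ' ++ w = done ++ List.replicate m ' ' ++ w ++ ([] : List Char) := by simp
          rw [htB, pvInner2_run w hw_nosp done m _ [] false rfl (by simp [List.length_append]; omega)]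
          simp only
          rw [pvOuter2_stop _ _ _ _ (by simp [List.length_append] <;> push_cast <;> omega)]
          simp [pvP2]
      | cons y ys =>
        by_cases hw : w = []
        · subst hw
          rw [pvJoin1_cons]
          simp only [List.nil_append]
          rw [pvOuter2]
          rw [if_pos (by simp [List.length_append] <;> push_cast <;> omega)]
          have hnoop : ¬(((done.length + m : Nat) : Int) < ((done ++ List.replicate m ' ' ++ ' ' :: pvJoin1 (y :: ys)).length : Int)
              ∧ PySem.List.pyGetD (done ++ List.replicate m ' ' ++ ' ' :: pvJoin1 (y :: ys)) ((done.length + m : Nat) : Int) ' ' ≠ ' ') := by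
            intro hcontra
            apply hcontra.2
            rw [PySem.List.pyGetD_natCast]
            have h2 := pvGetD_append (done ++ List.replicate m ' ') (' ' :: pvJoin1 (y :: ys)) 0 ' '
            simp only [List.length_append, List.length_replicate, Nat.add_zero] at h2
            rw [h2]
            simp
          rw [pvInner2_noop _ _ _ _ _ hnoop]
          simp only [Bool.false_eq_true, if_false]
          have ht : done ++ List.replicate m ' ' ++ ' ' :: pvJoin1 (y :: ys)
              = done ++ List.replicate (m + 1) ' ' ++ pvJoin1 (y :: ys) := by
            rw [List.append_assoc, List.append_assoc, pvRep_comm]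
            simp [List.replicate_succ]
          have hi : (((done.length + m : Nat) : Int) + 1) = ((done.length + (m+1) : Nat) : Int) := by
            push_cast; ring
          rw [ht, hi, ih hps_nosp done (m+1) f (by simp at hfuel ⊢ <;> omega)]
          have hp2 : pvP2 ([] :: y :: ys) m = pvP2 (y :: ys) (m + 1) := by
            simp [pvP2]
          rw [hp2]
        · obtain ⟨a, w', rfl⟩ : ∃ a w', w = a :: w' := by
            cases w with
            | nil => simp at hw
            | cons a b => exact ⟨a, b, rfl⟩
          rw [pvJoin1_cons, pvOuter2]
          rw [if_pos (by simp [List.length_append] <;> push_cast <;> omega)]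
          have ht : done ++ List.replicate m ' ' ++ ((a :: w') ++ ' ' :: pvJoin1 (y :: ys))
              = done ++ List.replicate m ' ' ++ (a :: w') ++ (' ' :: pvJoin1 (y :: ys)) := by simp
          rw [ht, pvInner2_run (a :: w') hw_nosp done m _ (' ' :: pvJoin1 (y :: ys)) false rfl
            (by simp [List.length_append]; omega)]
          simp only [List.isEmpty_cons, Bool.not_false, Bool.or_true, if_true]
          have ht2 : done ++ (a :: w') ++ List.replicate m ' ' ++ ' ' :: pvJoin1 (y :: ys)
              = (done ++ (a :: w') ++ [' ']) ++ List.replicate m ' ' ++ pvJoin1 (y :: ys) := by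
            rw [List.append_assoc (done ++ (a :: w')) (List.replicate m ' ')]
            rw [pvRep_comm]
            simp
          have hl : (((done.length + (a :: w').length : Nat) : Int) + 1)
              = (((done ++ (a :: w') ++ [' ']).length : Nat) : Int) := by
            simp
            push_cast
            ring
          have hi : (((done.length + (a :: w').length + m : Nat) : Int) + 1)
              = ((((done ++ (a :: w') ++ [' ']).length + m : Nat)) : Int) := by
            simp
            push_cast
            ring
          rw [ht2, hl, hi, ih hps_nosp (done ++ (a :: w') ++ [' ']) m f (by simp at hfuel ⊢ <;> omega)]
          have hp2 : pvP2 ((a :: w') :: y :: ys) m = (a :: w') ++ ' ' :: pvP2 (y :: ys) m := by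
            simp [pvP2]
          rw [hp2]
          simp

lemma pvP2_closed (pieces : List (List Char)) : ∀ (m : Nat),
    pvP2 pieces m =
      (if (pieces.filter (fun w => !w.isEmpty)).length = 0 then
        List.replicate (m + (pieces.length - 1)) ' '
       else pvJoin1 (pieces.filter (fun w => !w.isEmpty))
            ++ List.replicate (m + (pieces.length - 1) - ((pieces.filter (fun w => !w.isEmpty)).length - 1)) ' ') := by
  induction pieces with
  | nil => intro m; simp [pvP2]
  | cons w ps ih =>
    intro m
    cases ps with
    | nil =>
      by_cases hw : w = []
      · subst hw
        simp [pvP2]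
      · have hwe : w.isEmpty = false := by simp [List.isEmpty_iff, hw]
        simp [pvP2, hwe, pvJoin1_singleton, List.filter]
    | cons y ys =>
      by_cases hw : w = []
      · subst hw
        have hp2 : pvP2 ([] :: y :: ys) m = pvP2 (y :: ys) (m + 1) := by simp [pvP2]
        rw [hp2, ih (m + 1)]
        have hflt : (([] : List Char) :: y :: ys).filter (fun w => !w.isEmpty)
            = (y :: ys).filter (fun w => !w.isEmpty) := by simp [List.filter]
        rw [hflt]
        split_ifs with hzero
        · congr 1
          simp
          omega
        · congr 2
          simp
          omega
      · have hwe : w.isEmpty = false := by simp [List.isEmpty_iff, hw]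
        have hp2 : pvP2 (w :: y :: ys) m = w ++ ' ' :: pvP2 (y :: ys) m := by simp [pvP2, hw]
        rw [hp2, ih m]
        have hflt : (w :: y :: ys).filter (fun w => !w.isEmpty)
            = w :: ((y :: ys).filter (fun w => !w.isEmpty)) := by simp [List.filter, hwe]
        rw [hflt]
        have hk_le : ((y :: ys).filter (fun w => !w.isEmpty)).length ≤ (y :: ys).length :=
          List.length_filter_le _ _
        rw [if_neg (show ¬((w :: List.filter (fun w => !w.isEmpty) (y :: ys)).length = 0) by simp)]
        by_cases hzero : ((y :: ys).filter (fun w => !w.isEmpty)).length = 0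
        · rw [if_pos hzero]
          rw [List.length_eq_zero_iff] at hzero
          rw [hzero, pvJoin1_singleton]
          have hx2 : (' ' :: List.replicate (m + ((y :: ys).length - 1)) ' ' : List Char)
              = List.replicate (m + ((w :: y :: ys).length - 1) - ((w :: ([] : List (List Char))).length - 1)) ' ' := by
            rw [← List.replicate_succ]
            exact congrArg (fun n => List.replicate n ' ')
              (by simp only [List.length_cons, List.length_nil]; omega)
          rw [hx2]
        · rw [if_neg hzero]
          obtain ⟨z, zs, hzz⟩ : ∃ z zs, (y :: ys).filter (fun w => !w.isEmpty) = z :: zs := by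
            cases hf : (y :: ys).filter (fun w => !w.isEmpty) with
            | nil => rw [hf] at hzero; simp at hzero
            | cons z zs => exact ⟨z, zs, rfl⟩
          rw [hzz, pvJoin1_cons, ← hzz]
          simp only [List.cons_append, List.append_assoc]
          have hcnt : m + ((y :: ys).length - 1) - (((y :: ys).filter (fun w => !w.isEmpty)).length - 1)
              = m + ((w :: y :: ys).length - 1) - ((w :: (y :: ys).filter (fun w => !w.isEmpty)).length - 1) := by
            simp only [List.length_cons]
            omega
          rw [hcnt]

-- ===== right pass =====

lemma pvSwapA_right (A w : List Char) (c : Char) (m : Nat) (D : List Char) :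
    pvSwapA (A ++ w ++ c :: (List.replicate m ' ' ++ D)) ((A.length + w.length + m : Nat) : Int) ((A.length + w.length : Nat) : Int)
      = A ++ w ++ (List.replicate m ' ' ++ c :: D) := by
  have hx : (A ++ w ++ c :: (List.replicate m ' ' ++ D)).getD (A.length + w.length) ' ' = c := by
    rw [List.append_assoc]
    have h := pvGetD_append A (w ++ c :: (List.replicate m ' ' ++ D)) w.length ' '
    rw [h]
    have h2 := pvGetD_append w (c :: (List.replicate m ' ' ++ D)) 0 ' '
    simp only [Nat.add_zero] at h2
    rw [h2]
    simp
  cases m with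
  | zero =>
    simp only [List.replicate_zero, List.nil_append, Nat.add_zero] at *
    unfold pvSwapA
    simp only [PySem.List.pyGetD_natCast, PySem.List.pySetD_natCast, hx]
    have h0 : (A ++ w ++ c :: D).set (A.length + w.length) c = A ++ w ++ c :: D := by
      rw [List.append_assoc]
      have h1 := pvSet_append A (w ++ c :: D) w.length c
      rw [h1]
      have h2 := pvSet_append w (c :: D) 0 c
      simp only [Nat.add_zero] at h2
      rw [h2]
      simp
    rw [h0, h0]
  | succ n =>
    have hy : (A ++ w ++ c :: (List.replicate (n+1) ' ' ++ D)).getD (A.length + w.length + (n+1)) ' ' = ' ' := by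
      rw [List.append_assoc]
      have h := pvGetD_append A (w ++ c :: (List.replicate (n+1) ' ' ++ D)) (w.length + (n+1)) ' '
      rw [← Nat.add_assoc] at h
      rw [h]
      have h2 := pvGetD_append w (c :: (List.replicate (n+1) ' ' ++ D)) (n+1) ' '
      rw [h2]
      have h4 : (List.replicate (n+1) ' ' ++ D).getD n ' ' = ' ' := by
        rw [pvGetD_append_left (List.replicate (n+1) ' ') D n ' ' (by simp)]
        rw [List.getD_eq_getElem _ _ (by simp)]
        simp
      exact h4
    unfold pvSwapA
    simp only [PySem.List.pyGetD_natCast, PySem.List.pySetD_natCast, hx, hy]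
    have h1 : (A ++ w ++ c :: (List.replicate (n+1) ' ' ++ D)).set (A.length + w.length + (n+1)) c
        = A ++ w ++ c :: (List.replicate n ' ' ++ c :: D) := by
      rw [List.append_assoc]
      have ha := pvSet_append A (w ++ c :: (List.replicate (n+1) ' ' ++ D)) (w.length + (n+1)) c
      rw [← Nat.add_assoc] at ha
      rw [ha]
      have hb := pvSet_append w (c :: (List.replicate (n+1) ' ' ++ D)) (n+1) c
      rw [hb]
      have hcset : (c :: (List.replicate (n+1) ' ' ++ D)).set (n+1) c
          = c :: ((List.replicate (n+1) ' ' ++ D).set n c) := by simp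
      rw [hcset]
      have hd : List.replicate (n+1) ' ' ++ D = List.replicate n ' ' ++ (' ' :: D) := by
        rw [List.replicate_succ']
        simp
      rw [hd]
      have he := pvSet_append (List.replicate n ' ') (' ' :: D) 0 c
      simp only [Nat.add_zero, List.length_replicate] at he
      rw [he]
      simp
    rw [h1]
    have h2 : (A ++ w ++ c :: (List.replicate n ' ' ++ c :: D)).set (A.length + w.length) ' '
        = A ++ w ++ ' ' :: (List.replicate n ' ' ++ c :: D) := by
      rw [List.append_assoc]
      have ha := pvSet_append A (w ++ c :: (List.replicate n ' ' ++ c :: D)) w.length ' '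
      rw [ha]
      have hb := pvSet_append w (c :: (List.replicate n ' ' ++ c :: D)) 0 ' '
      simp only [Nat.add_zero] at hb
      rw [hb]
      simp
    rw [h2]
    simp [List.replicate_succ]

lemma pvInner3_run : ∀ (w : List Char), (∀ c ∈ w, c ≠ ' ') →
    ∀ (A : List Char) (m fuel : Nat) (D : List Char) (hwf : Bool),
    A.getLastD ' ' = ' ' → w.length < fuel →
    pvInner3 fuel (A ++ w ++ List.replicate m ' ' ++ D) (((A.length + w.length + m : Nat) : Int) - 1) (((A.length + w.length : Nat) : Int) - 1) hwf
      = (A ++ List.replicate m ' ' ++ w ++ D, ((A.length + m : Nat) : Int) - 1,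
         ((A.length : Nat) : Int) - 1, hwf || !w.isEmpty) := by
  intro w
  induction w using List.reverseRecOn with
  | nil =>
    intro _ A m fuel D hwf hA hf
    have hcond : ¬(0 ≤ (((A.length + ([] : List Char).length : Nat) : Int) - 1)
        ∧ PySem.List.pyGetD (A ++ [] ++ List.replicate m ' ' ++ D) (((A.length + ([] : List Char).length : Nat) : Int) - 1) ' ' ≠ ' ') := by
      rcases List.eq_nil_or_concat A with rfl | ⟨A', a, rfl⟩
      · simp
      · simp only [List.concat_eq_append] at hA ⊢
        have ha : a = ' ' := by simpa using hA
        subst ha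
        intro hcontra
        apply hcontra.2
        have hidx : ((((A' ++ [' ']).length + ([] : List Char).length : Nat) : Int) - 1) = ((A'.length : Nat) : Int) := by
          simp
        rw [hidx, PySem.List.pyGetD_natCast]
        have ht : A' ++ [' '] ++ [] ++ List.replicate m ' ' ++ D = A' ++ (' ' :: (List.replicate m ' ' ++ D)) := by simp
        rw [ht]
        have h := pvGetD_append A' (' ' :: (List.replicate m ' ' ++ D)) 0 ' '
        simp only [Nat.add_zero] at h
        rw [h]
        simp
    rw [pvInner3_noop _ _ _ _ _ hcond]
    simp
  | append_singleton w'' c ih =>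
    intro hw A m fuel D hwf hA hf
    have hc : c ≠ ' ' := hw c (by simp)
    cases fuel with
    | zero => simp at hf
    | succ f =>
      rw [pvInner3]
      have hi0 : (0 : Int) ≤ (((A.length + (w'' ++ [c]).length : Nat) : Int) - 1) := by
        simp
        push_cast
        omega
      have ht : A ++ (w'' ++ [c]) ++ List.replicate m ' ' ++ D
          = (A ++ w'') ++ c :: (List.replicate m ' ' ++ D) := by simp
      have hidx : (((A.length + (w'' ++ [c]).length : Nat) : Int) - 1) = ((((A ++ w'').length : Nat)) : Int) := by
        simp
        push_cast
        ring
      have hget : PySem.List.pyGetD (A ++ (w'' ++ [c]) ++ List.replicate m ' ' ++ D)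
          (((A.length + (w'' ++ [c]).length : Nat) : Int) - 1) ' ' = c := by
        rw [hidx, PySem.List.pyGetD_natCast, ht]
        have h := pvGetD_append (A ++ w'') (c :: (List.replicate m ' ' ++ D)) 0 ' '
        simp only [Nat.add_zero] at h
        rw [h]
        simp
      rw [if_pos ⟨hi0, by rw [hget]; exact hc⟩]
      have hswap : pvSwapA (A ++ (w'' ++ [c]) ++ List.replicate m ' ' ++ D)
          (((A.length + (w'' ++ [c]).length + m : Nat) : Int) - 1)
          (((A.length + (w'' ++ [c]).length : Nat) : Int) - 1)
          = (A ++ w'') ++ List.replicate m ' ' ++ c :: D := by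
        have hr1 : (((A.length + (w'' ++ [c]).length + m : Nat) : Int) - 1)
            = (((A ++ w'').length + (([c] : List Char).length - 1) + m : Nat) : Int) := by
          simp
          push_cast
          ring
        rw [hidx, hr1, ht]
        have h := pvSwapA_right (A ++ w'') [] c m D
        simp only [List.append_nil, List.length_nil, Nat.add_zero] at h
        have hfix : (((A ++ w'').length + (([c] : List Char).length - 1) + m : Nat) : Int)
            = (((A ++ w'').length + m : Nat) : Int) := by simp
        rw [hfix]
        have h' : pvSwapA ((A ++ w'') ++ c :: (List.replicate m ' ' ++ D))
            (((A ++ w'').length + m : Nat) : Int) (((A ++ w'').length : Nat) : Int)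
            = (A ++ w'') ++ (List.replicate m ' ' ++ c :: D) := by
          simpa using h
        rw [h']
        simp
      rw [hswap]
      have ht3 : (A ++ w'') ++ List.replicate m ' ' ++ c :: D
          = A ++ w'' ++ List.replicate m ' ' ++ (c :: D) := by simp
      have hrr : ((((A.length + (w'' ++ [c]).length + m : Nat) : Int) - 1) - 1)
          = (((A.length + w''.length + m : Nat) : Int) - 1) := by
        simp
        push_cast
        ring
      have hii : ((((A.length + (w'' ++ [c]).length : Nat) : Int) - 1) - 1)
          = (((A.length + w''.length : Nat) : Int) - 1) := by
        simp
        push_cast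
        ring
      rw [ht3, hrr, hii, ih (fun d hd => hw d (by simp [hd])) A m f (c :: D) true hA (by simp at hf ⊢; omega)]
      simp only [Prod.mk.injEq]
      refine ⟨by simp, by simp, by simp, by simp⟩

lemma pvOuter3_skip (e : Int) (C : List Char) (p : Nat) :
    ∀ (j fuel : Nat) (right : Int), j ≤ p →
    pvOuter3 e (j + fuel) (C ++ List.replicate p ' ') right (((C.length + j : Nat) : Int) - 1)
      = pvOuter3 e fuel (C ++ List.replicate p ' ') right ((C.length : Int) - 1) := by
  intro j
  induction j with
  | zero => intro fuel right _; simp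
  | succ j ih =>
    intro fuel right hj
    have hstep : (j + 1) + fuel = (j + fuel) + 1 := by omega
    rw [hstep, pvOuter3]
    have hi0 : (0 : Int) ≤ (((C.length + (j+1) : Nat) : Int) - 1) := by push_cast; omega
    rw [if_pos hi0]
    have hget : PySem.List.pyGetD (C ++ List.replicate p ' ') (((C.length + (j+1) : Nat) : Int) - 1) ' ' = ' ' := by
      have hidx : (((C.length + (j+1) : Nat) : Int) - 1) = ((C.length + j : Nat) : Int) := by push_cast; ring
      rw [hidx, PySem.List.pyGetD_natCast, pvGetD_append]
      rw [List.getD_eq_getElem _ _ (by simp; omega)]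
      simp
    rw [pvInner3_noop _ _ _ _ _ (by intro hcontra; exact hcontra.2 hget)]
    simp only [Bool.false_eq_true, if_false]
    have hidx2 : ((((C.length + (j+1) : Nat) : Int) - 1) - 1) = (((C.length + j : Nat) : Int) - 1) := by
      push_cast; ring
    rw [hidx2]
    exact ih fuel right (by omega)

lemma pvOuter3_allspaces (e : Int) : ∀ (fuel : Nat) (s : Nat) (right i : Int), i < (s : Int) →
    pvOuter3 e fuel (List.replicate s ' ') right i = List.replicate s ' ' := by
  intro fuel
  induction fuel with
  | zero => intro s right i _; rfl
  | succ f ih =>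
    intro s right i hi
    rw [pvOuter3]
    by_cases h0 : 0 ≤ i
    · rw [if_pos h0]
      have hget : PySem.List.pyGetD (List.replicate s ' ') i ' ' = ' ' := by
        obtain ⟨k, rfl⟩ : ∃ k : Nat, i = (k : Int) := ⟨i.toNat, by omega⟩
        have hks : k < s := by exact_mod_cast hi
        rw [PySem.List.pyGetD_natCast, List.getD_eq_getElem _ _ (by simpa using hks)]
        simp
      rw [pvInner3_noop _ _ _ _ _ (by intro hcontra; exact hcontra.2 hget)]
      simp only [Bool.false_eq_true, if_false]
      exact ih s right (i - 1) (by omega)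
    · rw [if_neg h0]

lemma pvOuter3_step (e : Int) (f : Nat) (A w D : List Char) (m : Nat)
    (hA : A.getLastD ' ' = ' ') (hwne : w ≠ []) (hwno : ∀ c ∈ w, c ≠ ' ') :
    pvOuter3 e (f+1) (A ++ w ++ List.replicate m ' ' ++ D)
        (((A.length + w.length + m : Nat) : Int) - 1) (((A.length + w.length : Nat) : Int) - 1)
      = pvOuter3 e f (A ++ List.replicate m ' ' ++ w ++ D)
          ((((A.length + m : Nat) : Int) - 1) - e) ((((A.length : Nat) : Int) - 1) - 1) := by
  have hwl : 1 ≤ w.length := by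
    cases w with
    | nil => simp at hwne
    | cons a b => simp
  rw [pvOuter3]
  rw [if_pos (show (0:Int) ≤ ((A.length + w.length : Nat) : Int) - 1 by push_cast; omega)]
  rw [pvInner3_run w hwno A m ((A ++ w ++ List.replicate m ' ' ++ D).length + 1) D false hA
    (by simp [List.length_append]; omega)]
  have hflag : (false || !w.isEmpty) = true := by simp [List.isEmpty_iff, hwne]
  simp only [hflag, if_true]

lemma pvOuter3_words (e : Nat) :
    ∀ (ws : List (List Char)) (D : List Char) (fuel : Nat),
    ws ≠ [] → (∀ w ∈ ws, w ≠ [] ∧ ∀ c ∈ w, c ≠ ' ') → (2 ≤ ws.length → 1 ≤ e) →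
    ws.length ≤ fuel →
    pvOuter3 (e : Int) fuel (pvJoin1 ws ++ List.replicate ((ws.length - 1) * (e - 1)) ' ' ++ D)
      ((((pvJoin1 ws).length + (ws.length - 1) * (e - 1) : Nat) : Int) - 1)
      ((((pvJoin1 ws).length : Nat) : Int) - 1)
      = List.intercalate (List.replicate e ' ') ws ++ D := by
  intro ws
  induction ws using List.reverseRecOn with
  | nil => intro D fuel hne _ _ _; exact absurd rfl hne
  | append_singleton l w ih =>
    intro D fuel _ hws he hfuel
    have hwne : w ≠ [] := (hws w (by simp)).1
    have hwno : ∀ c ∈ w, c ≠ ' ' := (hws w (by simp)).2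
    by_cases hl : l = []
    · subst hl
      cases fuel with
      | zero => simp at hfuel
      | succ f =>
        have hm0 : (((([] : List (List Char)) ++ [w]).length - 1) * (e - 1)) = 0 := by simp
        have ht : pvJoin1 ([] ++ [w]) ++ List.replicate (((([] : List (List Char)) ++ [w]).length - 1) * (e - 1)) ' ' ++ D
            = ([] : List Char) ++ w ++ List.replicate 0 ' ' ++ D := by
          rw [hm0]
          simp [pvJoin1_singleton]
        have hr : (((pvJoin1 ([] ++ [w])).length + ((([] : List (List Char)) ++ [w]).length - 1) * (e - 1) : Nat) : Int) - 1
            = (((([] : List Char).length + w.length + 0 : Nat)) : Int) - 1 := by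
          rw [hm0]
          simp [pvJoin1_singleton]
        have hi : (((pvJoin1 ([] ++ [w])).length : Nat) : Int) - 1
            = (((([] : List Char).length + w.length : Nat)) : Int) - 1 := by
          simp [pvJoin1_singleton]
        rw [ht, hr, hi]
        rw [pvOuter3_step (e : Int) f ([] : List Char) w D 0 rfl hwne hwno]
        rw [pvOuter3_stop _ _ _ _ _ (by norm_num)]
        simp [List.intercalate]
    · cases fuel with
      | zero => simp at hfuel
      | succ f =>
        have hlp : 0 < l.length := List.length_pos_iff.mpr hl
        have he1 : 1 ≤ e := he (by simp; omega)
        have hm1 : ((l ++ [w]).length - 1) * (e - 1) + 1 = (l.length - 1) * (e - 1) + e := by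
          obtain ⟨q, rfl⟩ : ∃ q, e = q + 1 := ⟨e - 1, by omega⟩
          obtain ⟨n, hn⟩ : ∃ n, l.length = n + 1 := ⟨l.length - 1, by omega⟩
          simp [hn]
          ring
        have hA_last : (pvJoin1 l ++ [' ']).getLastD ' ' = ' ' := by
          rw [← List.concat_eq_append]
          simp
        have hJ : pvJoin1 (l ++ [w]) = (pvJoin1 l ++ [' ']) ++ w := by
          rw [pvJoin1_concat l w hl]
          simp
        have ht : pvJoin1 (l ++ [w]) ++ List.replicate (((l ++ [w]).length - 1) * (e - 1)) ' ' ++ D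
            = (pvJoin1 l ++ [' ']) ++ w ++ List.replicate (((l ++ [w]).length - 1) * (e - 1)) ' ' ++ D := by
          rw [hJ]
        have hr : (((pvJoin1 (l ++ [w])).length + ((l ++ [w]).length - 1) * (e - 1) : Nat) : Int) - 1
            = ((((pvJoin1 l ++ [' ']).length + w.length + ((l ++ [w]).length - 1) * (e - 1) : Nat)) : Int) - 1 := by
          rw [hJ]
          simp <;> omega
        have hi : (((pvJoin1 (l ++ [w])).length : Nat) : Int) - 1
            = ((((pvJoin1 l ++ [' ']).length + w.length : Nat)) : Int) - 1 := by
          rw [hJ]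
          simp <;> omega
        rw [ht, hr, hi, pvOuter3_step (e : Int) f (pvJoin1 l ++ [' ']) w D
          (((l ++ [w]).length - 1) * (e - 1)) hA_last hwne hwno]
        have ht2 : (pvJoin1 l ++ [' ']) ++ List.replicate (((l ++ [w]).length - 1) * (e - 1)) ' ' ++ w ++ D
            = pvJoin1 l ++ List.replicate ((l.length - 1) * (e - 1)) ' ' ++ (List.replicate e ' ' ++ w ++ D) := by
          have h1 : (pvJoin1 l ++ [' ']) ++ List.replicate (((l ++ [w]).length - 1) * (e - 1)) ' ' ++ w ++ D
              = pvJoin1 l ++ (List.replicate (((l ++ [w]).length - 1) * (e - 1) + 1) ' ' ++ (w ++ D)) := by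
            simp [List.append_assoc, List.replicate_succ]
          have h2 : List.replicate (((l ++ [w]).length - 1) * (e - 1) + 1) ' '
              = List.replicate ((l.length - 1) * (e - 1)) ' ' ++ List.replicate e ' ' := by
            rw [← List.replicate_add]
            rw [hm1]
          rw [h1, h2]
          simp only [List.append_assoc]
        have hrr : (((((pvJoin1 l ++ [' ']).length + ((l ++ [w]).length - 1) * (e - 1) : Nat)) : Int) - 1) - (e : Int)
            = (((pvJoin1 l).length + (l.length - 1) * (e - 1) : Nat) : Int) - 1 := by
          have hlen : (pvJoin1 l ++ [' ']).length = (pvJoin1 l).length + 1 := by simp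
          have h9 : (pvJoin1 l ++ [' ']).length + ((l ++ [w]).length - 1) * (e - 1)
              = (pvJoin1 l).length + (l.length - 1) * (e - 1) + e := by
            rw [hlen]
            omega
          rw [h9]
          push_cast
          ring
        have hii : (((((pvJoin1 l ++ [' ']).length : Nat)) : Int) - 1) - 1
            = (((pvJoin1 l).length : Nat) : Int) - 1 := by
          simp only [List.length_append, List.length_cons, List.length_nil]
          push_cast
          ring
        rw [ht2, hrr, hii, ih (List.replicate e ' ' ++ w ++ D) f hl
          (fun y hy => hws y (by simp [hy])) (fun _ => he1) (by simp at hfuel ⊢ <;> omega)]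
        rw [pvIntercalate_concat (List.replicate e ' ') l w hl]
        simp [List.append_assoc]

-- ===== VERDICT (by name: the statement is the Claim_ definition above) =====
theorem reorderSpaces_kamyu_spec : Claim_equal_reorderSpaces_kamyu := by
  intro text _
  show reorderSpaces_kamyu text = reorderSpaces_kamyu_alt text
  unfold reorderSpaces_kamyu reorderSpaces_kamyu_alt
  simp only [pvCountLoop, pvSplitOn_eq, pvCountSp_eq]
  generalize text.toList = cs
  have hno := pvNoSp_splitSp cs
  have hnn := pvSplitSp_ne_nil cs
  have hjn := pvJoin1_splitSp cs
  have hs : cs.count ' ' = (pvSplitSp cs).length - 1 := by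
    have h := pvCount_join1 (pvSplitSp cs) hno hnn
    rw [hjn] at h
    exact h
  have hP1 : 0 < (pvSplitSp cs).length := by
    rcases List.exists_cons_of_ne_nil hnn with ⟨a, l, hq⟩
    simp [hq]
  have hcl : cs.count ' ' ≤ cs.length := List.count_le_length
  have hk_le : ((pvSplitSp cs).filter (fun w => !w.isEmpty)).length ≤ (pvSplitSp cs).length :=
    List.length_filter_le _ _
  have h2 : pvOuter2 (cs.length + 1) cs 0 0 = pvP2 (pvSplitSp cs) 0 := by
    have h := pvOuter2_run (pvSplitSp cs) hno [] 0 (cs.length + 1) (by omega)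
    simp only [List.length_nil, List.replicate_zero, List.nil_append, Nat.add_zero,
      Nat.zero_add, Nat.cast_zero] at h
    rw [hjn] at h
    exact h
  rw [h2, pvP2_closed]
  simp only [pvWords]
  set ws := (pvSplitSp cs).filter (fun w => !w.isEmpty) with hwsdef
  by_cases hk0 : ws.length = 0
  · rw [if_pos hk0]
    have hws0 : ws = [] := List.length_eq_zero_iff.mp hk0
    have hcond : ¬(((ws.length : Nat) : Int) - 1 > 0) := by rw [hk0]; norm_num
    rw [if_neg hcond, if_neg hcond, if_pos (by omega : ws.length ≤ 1)]
    rw [hws0]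
    simp only [List.headD_nil, List.nil_append, List.length_replicate]
    rw [pvOuter3_allspaces _ _ _ _ _ (by push_cast; omega)]
    have hcc : 0 + ((pvSplitSp cs).length - 1) = cs.count ' ' := by omega
    rw [hcc]
  · have hk1 : 1 ≤ ws.length := by omega
    rw [if_neg hk0]
    have hwsne : ws ≠ [] := by
      intro hcon
      rw [hcon] at hk0
      simp at hk0
    have hwords : ∀ w ∈ ws, w ≠ [] ∧ ∀ c ∈ w, c ≠ ' ' := by
      intro w hw
      have hmem := List.mem_filter.mp hw
      exact ⟨by simpa using hmem.2, hno w hmem.1⟩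
    have hsk : ws.length - 1 ≤ cs.count ' ' := by omega
    have hrw : 0 + ((pvSplitSp cs).length - 1) - (ws.length - 1)
        = cs.count ' ' - (ws.length - 1) := by omega
    rw [hrw]
    have hLk : ws.length ≤ (pvJoin1 ws).length + 1 := pvLen_join1 ws
    simp only [List.length_append, List.length_replicate]
    by_cases hk2 : ws.length = 1
    · -- one word: equal = 0, extra = count
      have hcond : ¬(((ws.length : Nat) : Int) - 1 > 0) := by rw [hk2]; norm_num
      rw [if_neg hcond, if_neg hcond, if_pos (by omega : ws.length ≤ 1)]
      obtain ⟨w, hwxx⟩ : ∃ w, ws = [w] := List.length_eq_one_iff.mp hk2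
      have hwmem : w ∈ ws := by simp [hwxx]
      have hwne := (hwords w hwmem).1
      have hwno := (hwords w hwmem).2
      have hr1 : cs.count ' ' - (ws.length - 1) = cs.count ' ' := by rw [hk2]; simp
      rw [hr1]
      have hfuel : (pvJoin1 ws).length + cs.count ' ' + 1
          = cs.count ' ' + ((pvJoin1 ws).length + 1) := by omega
      rw [hfuel]
      rw [pvOuter3_skip 0 (pvJoin1 ws) (cs.count ' ') (cs.count ' ') ((pvJoin1 ws).length + 1) _ (le_refl _)]
      rw [hwxx, pvJoin1_singleton]
      have ht : w ++ List.replicate (cs.count ' ') ' '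
          = ([] : List Char) ++ w ++ List.replicate 0 ' ' ++ List.replicate (cs.count ' ') ' ' := by
        simp
      have hri : ((w.length + cs.count ' ' : Nat) : Int) - 1 - ((cs.count ' ' : Nat) : Int)
          = ((( ([] : List Char).length + w.length + 0 : Nat)) : Int) - 1 := by
        simp only [List.length_nil]
        push_cast
        ring
      have hii : ((w.length : Nat) : Int) - 1
          = ((( ([] : List Char).length + w.length : Nat)) : Int) - 1 := by
        rw [show (([] : List Char).length + w.length) = w.length from by simp]
      rw [ht, hri, hii]
      rw [pvOuter3_step 0 w.length ([] : List Char) w (List.replicate (cs.count ' ') ' ') 0 rfl hwne hwno]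
      rw [pvOuter3_stop _ _ _ _ _ (by norm_num)]
      simp
    · -- several words
      have hk2' : 2 ≤ ws.length := by omega
      have hcond : (((ws.length : Nat) : Int) - 1 > 0) := by push_cast; omega
      rw [if_pos hcond, if_pos hcond, if_neg (by omega : ¬ ws.length ≤ 1)]
      have hdm : (ws.length - 1) * (cs.count ' ' / (ws.length - 1)) + cs.count ' ' % (ws.length - 1)
          = cs.count ' ' := Nat.div_add_mod _ _
      have he1 : 1 ≤ cs.count ' ' / (ws.length - 1) := (Nat.one_le_div_iff (by omega)).mpr (by omega)
      have hxr : cs.count ' ' % (ws.length - 1) ≤ cs.count ' ' - (ws.length - 1) := by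
        have h1 : (ws.length - 1) * 1 ≤ (ws.length - 1) * (cs.count ' ' / (ws.length - 1)) :=
          Nat.mul_le_mul_left _ he1
        omega
      have hm : cs.count ' ' - (ws.length - 1) - cs.count ' ' % (ws.length - 1)
          = (ws.length - 1) * (cs.count ' ' / (ws.length - 1) - 1) := by
        obtain ⟨q, hq⟩ : ∃ q, cs.count ' ' / (ws.length - 1) = q + 1 :=
          ⟨cs.count ' ' / (ws.length - 1) - 1, by omega⟩
        have ha : (ws.length - 1) * (cs.count ' ' / (ws.length - 1))
            = (ws.length - 1) * q + (ws.length - 1) := by rw [hq]; ring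
        have hb : (ws.length - 1) * (cs.count ' ' / (ws.length - 1) - 1) = (ws.length - 1) * q := by
          rw [hq]
          simp
        omega
      have hfd : PySem.Int.floordiv ((cs.count ' ' : Nat) : Int) (((ws.length : Nat) : Int) - 1)
          = ((cs.count ' ' / (ws.length - 1) : Nat) : Int) := by
        have hc : (((ws.length : Nat) : Int) - 1) = (((ws.length - 1 : Nat)) : Int) := by push_cast; omega
        rw [hc, PySem.Int.floordiv_natCast]
      have hmd : PySem.Int.mod ((cs.count ' ' : Nat) : Int) (((ws.length : Nat) : Int) - 1)
          = ((cs.count ' ' % (ws.length - 1) : Nat) : Int) := by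
        have hc : (((ws.length : Nat) : Int) - 1) = (((ws.length - 1 : Nat)) : Int) := by push_cast; omega
        rw [hc, PySem.Int.mod_natCast]
      rw [hfd, hmd]
      have hfuel : (pvJoin1 ws).length + (cs.count ' ' - (ws.length - 1)) + 1
          = (cs.count ' ' - (ws.length - 1)) + ((pvJoin1 ws).length + 1) := by omega
      rw [hfuel]
      rw [pvOuter3_skip _ (pvJoin1 ws) (cs.count ' ' - (ws.length - 1))
        (cs.count ' ' - (ws.length - 1)) ((pvJoin1 ws).length + 1) _ (le_refl _)]
      have ht : pvJoin1 ws ++ List.replicate (cs.count ' ' - (ws.length - 1)) ' '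
          = pvJoin1 ws ++ List.replicate ((ws.length - 1) * (cs.count ' ' / (ws.length - 1) - 1)) ' '
            ++ List.replicate (cs.count ' ' % (ws.length - 1)) ' ' := by
        rw [List.append_assoc, ← List.replicate_add]
        congr 2
        omega
      have hri : ((((pvJoin1 ws).length + (cs.count ' ' - (ws.length - 1)) : Nat)) : Int) - 1
            - ((cs.count ' ' % (ws.length - 1) : Nat) : Int)
          = (((pvJoin1 ws).length + (ws.length - 1) * (cs.count ' ' / (ws.length - 1) - 1) : Nat) : Int) - 1 := by
        have h1 : (pvJoin1 ws).length + (cs.count ' ' - (ws.length - 1))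
            = (pvJoin1 ws).length + (ws.length - 1) * (cs.count ' ' / (ws.length - 1) - 1)
              + cs.count ' ' % (ws.length - 1) := by omega
        rw [h1]
        push_cast
        ring
      rw [ht, hri]
      rw [pvOuter3_words (cs.count ' ' / (ws.length - 1)) ws
        (List.replicate (cs.count ' ' % (ws.length - 1)) ' ') ((pvJoin1 ws).length + 1)
        hwsne hwords (fun _ => he1) (by omega)]
      rfl
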